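-- pv_equiv track=rewrite | github.com/Narahari28/adventofcode | tree_house.py | calc_dist_from_tops
-- ===== SOURCE A (Python) =====
-- def calc_dist_from_tops(grid):
--     dists = [row[:] for row in grid]
--     for j in range(len(grid[0])):
--         dists[0][j] = 0
--     for j in range(len(grid[0])):
--         dists[1][j] = 1
--     for i in range(2, len(grid)):
--         for j in range(len(grid[0])):
--             count = 0
--             ind = i
--             while True:
--                 count += 1
--                 ind -= 1
--                 if ind < 0:
--                     count -= 1
--                     break
--                 if grid[i][j] <= grid[ind][j]:
--                     break
--             dists[i][j] = count
--     return dists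
-- ===== SOURCE B (Python) =====
-- def calc_dist_from_tops(grid):
--     # One top-down pass per cell using a monotonic stack per column:
--     # stack j holds (height, row) pairs with non-increasing heights going down,
--     # so the nearest row above with height >= current is found in amortized O(1).
--     w = len(grid[0])
--     stacks = [[] for _ in range(w)]
--     out = []
--     for i, row in enumerate(grid):
--         dists = []
--         for h, st in zip(row, stacks):
--             while st and st[-1][0] < h:
--                 st.pop()
--             dists.append(i - st[-1][1] if st else i)
--             st.append((h, i))
--         out.append(dists + row[w:])
--     return out
-- ===== Notes on version B (the rewrite author's own statement) =====
-- stated objective: faster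
-- what changed: Replaces the per-cell upward rescan with a monotonic stack per column (nearest taller-or-equal tree above), one top-down pass over the grid.
import Mathlib
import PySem

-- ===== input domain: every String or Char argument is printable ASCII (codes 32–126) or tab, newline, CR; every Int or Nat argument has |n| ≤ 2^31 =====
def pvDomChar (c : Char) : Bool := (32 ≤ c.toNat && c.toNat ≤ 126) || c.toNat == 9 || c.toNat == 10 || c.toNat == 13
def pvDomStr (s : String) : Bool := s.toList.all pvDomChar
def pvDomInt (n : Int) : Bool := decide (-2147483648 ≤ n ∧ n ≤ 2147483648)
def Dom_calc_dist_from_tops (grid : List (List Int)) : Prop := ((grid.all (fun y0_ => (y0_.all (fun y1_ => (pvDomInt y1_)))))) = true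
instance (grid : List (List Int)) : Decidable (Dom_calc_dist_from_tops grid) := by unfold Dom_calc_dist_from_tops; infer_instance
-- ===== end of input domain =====

-- B replaces A's per-cell upward rescan by one top-down pass with a monotonic stack per column.
-- Both programs only READ the argument; neither mutates it observably.

-- ===== PORT A =====
-- grid[i][j]; indices proved in range by Pre_, so getD's default is never used there
def colv (grid : List (List Int)) (i j : Nat) : Int := (grid.getD i []).getD j 0

-- the 'while True' loop of A: count/ind are the Python locals (ind ≥ 0 here; the
-- iteration that would make ind negative returns count unchanged, as in A)
def aWhile (grid : List (List Int)) (i j : Nat) (count : Int) : Nat → Int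
  | 0 => count                                   -- count += 1; ind = -1 < 0: count -= 1; break
  | ind + 1 =>                                   -- count += 1; ind' = ind
      if colv grid i j ≤ colv grid ind j then count + 1
      else aWhile grid i j (count + 1) ind

-- rows built in order: row 0 set to 0s, row 1 to 1s, rows i ≥ 2 by the while loop
def aGo (grid : List (List Int)) (w i : Nat) : List (List Int) → List (List Int)
  | [] => []
  | row :: rest =>
      (if i = 0 then row.mapIdx (fun j x => if j < w then (0 : Int) else x)
       else if i = 1 then row.mapIdx (fun j x => if j < w then (1 : Int) else x)
       else row.mapIdx (fun j x => if j < w then aWhile grid i j 0 i else x)) :: aGo grid w (i + 1) rest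

def calc_dist_from_tops (grid : List (List Int)) : List (List Int) :=
  aGo grid (grid.headD []).length 0 grid

-- ===== PORT B =====
-- Python stack top st[-1] is the HEAD of the Lean list
def popWhile (h : Int) : List (Int × Nat) → List (Int × Nat)
  | [] => []
  | p :: rest => if p.1 < h then popWhile h rest else p :: rest

-- one cell: (distance appended to dists, updated stack for this column)
def bStep (i : Nat) (h : Int) (st : List (Int × Nat)) : Int × List (Int × Nat) :=
  let st' := popWhile h st
  ((match st' with | [] => (i : Int) | p :: _ => (i : Int) - p.2), (h, i) :: st')

-- the row loop; zip(row, stks) = zipWith, row[w:] = drop w (w ≥ 0)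
def bGo (w i : Nat) (rows : List (List Int)) (stks : List (List (Int × Nat))) : List (List Int) :=
  match rows with
  | [] => []
  | row :: rest =>
      let res := List.zipWith (bStep i) row stks
      (res.map Prod.fst ++ row.drop w) :: bGo w (i + 1) rest (res.map Prod.snd)

def calc_dist_from_tops_alt (grid : List (List Int)) : List (List Int) :=
  bGo (grid.headD []).length 0 grid (List.replicate (grid.headD []).length [])

-- ===== PRECONDITION & SPEC =====
-- exactly where the Python A returns: ≥ 2 rows (it writes dists[1]) and every row at
-- least as long as row 0 (it indexes grid[i][j] for j < len(grid[0]))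
def Pre_calc_dist_from_tops (grid : List (List Int)) : Prop :=
  2 ≤ grid.length ∧ ∀ row ∈ grid, (grid.headD []).length ≤ row.length
instance (grid : List (List Int)) : Decidable (Pre_calc_dist_from_tops grid) := by
  unfold Pre_calc_dist_from_tops; infer_instance

def pvWitness_calc_dist_from_tops : List (List Int) := [[1, 2], [3, 0], [2, 2], [3, 1]]

def Spec_calc_dist_from_tops (grid : List (List Int)) (out : List (List Int)) : Prop := out = calc_dist_from_tops_alt grid
instance (grid : List (List Int)) (out : List (List Int)) : Decidable (Spec_calc_dist_from_tops grid out) := by unfold Spec_calc_dist_from_tops; infer_instance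

-- ===== CLAIM (what is proved, stated in full; the proofs are below) =====
def Claim_equal_calc_dist_from_tops : Prop := ∀ (grid : List (List Int)), Dom_calc_dist_from_tops grid → Pre_calc_dist_from_tops grid → Spec_calc_dist_from_tops grid (calc_dist_from_tops grid)

-- ===== LEMMAS AND PROOFS =====

-- distance to the nearest ≥ h in a list read nearest-first (the common spec of A and B)
def specD (h : Int) : List Int → Int
  | [] => 0
  | a :: rest => if h ≤ a then 1 else 1 + specD h rest

def revcol (grid : List (List Int)) (j n : Nat) : List Int :=
  ((List.range n).map (fun t => colv grid t j)).reverse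

-- the spec walker both ports are reduced to
def sGo (w : Nat) : List (List Int) → List (List Int) → List (List Int)
  | _, [] => []
  | pre, row :: rest =>
      row.mapIdx (fun j x => if j < w then specD x ((pre.map (fun r => r.getD j 0)).reverse) else x)
        :: sGo w (pre ++ [row]) rest

theorem mapIdx_congr' {a b : Type} (l : List a) (f g : Nat → a → b)
    (h : ∀ (j : Nat) (hj : j < l.length), f j l[j] = g j l[j]) : l.mapIdx f = l.mapIdx g := by
  apply List.ext_getElem
  · simp
  · intro j h1 h2
    simp only [List.getElem_mapIdx]
    exact h j (by simpa using h1)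

theorem aWhile_eq_specD (grid : List (List Int)) (i j : Nat) :
    ∀ (ind : Nat) (count : Int),
      aWhile grid i j count ind = count + specD (colv grid i j) (revcol grid j ind) := by
  intro ind
  induction ind with
  | zero => intro c; simp [aWhile, revcol, specD]
  | succ n ih =>
      intro c
      have hrev : revcol grid j (n + 1) = colv grid n j :: revcol grid j n := by
        simp [revcol, List.range_succ]
      rw [hrev]
      by_cases h : colv grid i j ≤ colv grid n j
      · simp [aWhile, h, specD]
      · simp only [aWhile, h, specD, if_false, ih]
        ring

theorem getD_append_cons {a : Type} (pre : List a) (x : a) (suf : List a) (d : a) :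
    (pre ++ x :: suf).getD pre.length d = x := by
  have h : pre.length < (pre ++ x :: suf).length := by simp
  rw [List.getD_eq_getElem _ _ h, List.getElem_append_right (le_refl pre.length)]
  simp

theorem map_range_colv (pre suf : List (List Int)) (j : Nat) :
    (List.range pre.length).map (fun t => colv (pre ++ suf) t j)
      = pre.map (fun r => r.getD j 0) := by
  apply List.ext_getElem
  · simp
  · intro t h1 h2
    simp only [List.getElem_map, List.getElem_range]
    have ht : t < pre.length := by simpa using h2
    unfold colv
    congr 1
    rw [List.getD_eq_getElem _ _ (by simp; omega), List.getElem_append_left ht]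

-- A equals the spec walker
theorem aGo_eq_sGo (grid : List (List Int)) (w : Nat) :
    ∀ (rest pre : List (List Int)), pre ++ rest = grid →
      (∀ row ∈ rest, w ≤ row.length) →
      aGo grid w pre.length rest = sGo w pre rest := by
  intro rest
  induction rest with
  | nil => intro pre _ _; simp [aGo, sGo]
  | cons row rest' ih =>
      intro pre hg hlen
      have hrow : w ≤ row.length := hlen row (by simp)
      show _ :: _ = _ :: _
      congr 1
      · -- the head rows agree
        split_ifs with h0 h1
        · -- i = 0 : pre = []
          have hp : pre = [] := List.length_eq_zero_iff.mp h0
          subst hp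
          apply mapIdx_congr'
          intro j hj
          by_cases hjw : j < w <;> simp [hjw, specD]
        · -- i = 1 : pre = [r0]
          obtain ⟨r0, hp⟩ := List.length_eq_one_iff.mp h1
          subst hp
          apply mapIdx_congr'
          intro j hj
          by_cases hjw : j < w
          · simp only [hjw, if_pos, List.map_cons, List.map_nil, List.reverse_cons,
              List.reverse_nil, List.nil_append, specD]
            split_ifs <;> norm_num
          · simp [hjw]
        · -- i ≥ 2
          apply mapIdx_congr'
          intro j hj
          by_cases hjw : j < w
          · simp only [hjw, if_pos]
            rw [aWhile_eq_specD, zero_add]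
            have hcol : colv grid pre.length j = row[j] := by
              rw [← hg]
              unfold colv
              rw [getD_append_cons, List.getD_eq_getElem _ _ (lt_of_lt_of_le hjw hrow)]
            have hrev : revcol grid j pre.length = (pre.map (fun r => r.getD j 0)).reverse := by
              unfold revcol
              rw [← hg, map_range_colv]
            rw [hcol, hrev]
          · simp [hjw]
      · -- the tails agree
        have := ih (pre ++ [row]) (by simpa using hg)
          (fun r hr => hlen r (by simp [hr]))
        simpa using this

def buildStack : List Int → Nat → List (Int × Nat) → List (Int × Nat)
  | [], _, st => st
  | h :: rest, i, st => buildStack rest (i + 1) ((h, i) :: popWhile h st)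

theorem popWhile_popWhile (h a : Int) (hle : a ≤ h) :
    ∀ st : List (Int × Nat), popWhile h (popWhile a st) = popWhile h st := by
  intro st
  induction st with
  | nil => simp [popWhile]
  | cons p rest ih =>
      by_cases hp : p.1 < a
      · have hph : p.1 < h := lt_of_lt_of_le hp hle
        simp [popWhile, hp, hph, ih]
      · simp [popWhile, hp]

theorem buildStack_snoc (a : Int) :
    ∀ (l : List Int) (i : Nat) (st : List (Int × Nat)),
      buildStack (l ++ [a]) i st = (a, i + l.length) :: popWhile a (buildStack l i st) := by
  intro l
  induction l with
  | nil => intro i st; simp [buildStack]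
  | cons h l ih =>
      intro i st
      simp only [List.cons_append, buildStack, ih, List.length_cons]
      have : i + 1 + l.length = i + (l.length + 1) := by omega
      rw [this]

-- the monotonic stack answers the nearest-≥ query
theorem stack_query (h : Int) (l : List Int) :
    (match popWhile h (buildStack l 0 []) with
     | [] => (l.length : Int)
     | p :: _ => (l.length : Int) - p.2) = specD h l.reverse := by
  induction l using List.reverseRecOn with
  | nil => simp [buildStack, popWhile, specD]
  | append_singleton l a ih =>
      rw [buildStack_snoc]
      by_cases hah : h ≤ a
      · have hna : ¬ a < h := not_lt.mpr hah
        simp only [popWhile, hna, List.reverse_append,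
          List.reverse_cons, List.reverse_nil, List.nil_append, List.cons_append,
          specD, hah, if_pos, List.length_append, List.length_cons,
          List.length_nil]
        push_cast
        ring
      · have hlt : a < h := lt_of_not_ge hah
        have hrw : popWhile h ((a, 0 + l.length) :: popWhile a (buildStack l 0 []))
            = popWhile h (buildStack l 0 []) := by
          simp only [popWhile, hlt, if_pos]
          exact popWhile_popWhile h a (le_of_lt hlt) _
        rw [hrw]
        have hspec : specD h (l ++ [a]).reverse = 1 + specD h l.reverse := by
          simp [specD, hah]
        rw [hspec, ← ih]
        cases hq : popWhile h (buildStack l 0 []) with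
        | nil => simp; ring
        | cons p rest => simp; ring

-- B equals the spec walker
theorem bGo_eq_sGo (w : Nat) :
    ∀ (rest pre : List (List Int)), (∀ row ∈ rest, w ≤ row.length) →
      bGo w pre.length rest
        ((List.range w).map (fun j => buildStack (pre.map (fun r => r.getD j 0)) 0 [])) =
      sGo w pre rest := by
  intro rest
  induction rest with
  | nil => intro pre _; simp [bGo, sGo]
  | cons row rest' ih =>
      intro pre hlen
      have hrow : w ≤ row.length := hlen row (by simp)
      show _ :: _ = _ :: _
      congr 1
      · -- the produced row equals the spec row
        apply List.ext_getElem
        · simp [hrow]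
        · intro k h1 h2
          have hlen1 : (List.zipWith (bStep pre.length) row
              ((List.range w).map (fun j => buildStack (pre.map (fun r => r.getD j 0)) 0 []))).length = w := by
            simp [hrow]
          by_cases hkw : k < w
          · rw [List.getElem_append_left (by simp; omega)]
            simp only [List.getElem_map, List.getElem_zipWith, List.getElem_range,
              List.getElem_mapIdx]
            have hk2 : k < row.length := lt_of_lt_of_le hkw hrow
            simp only [hkw, if_pos]
            show (bStep pre.length row[k] (buildStack (pre.map (fun r => r.getD k 0)) 0 [])).1 = _
            unfold bStep
            simp only
            have := stack_query row[k] (pre.map (fun r => r.getD k 0))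
            simp only [List.length_map] at this
            exact this
          · rw [List.getElem_append_right (by simp; omega)]
            simp only [List.getElem_drop, List.getElem_mapIdx, hkw, if_false]
            congr 1
            simp
            omega
      · -- the stacks are updated to the stacks of pre ++ [row]
        have hst : (List.zipWith (bStep pre.length) row
              ((List.range w).map (fun j => buildStack (pre.map (fun r => r.getD j 0)) 0 []))).map Prod.snd
            = (List.range w).map (fun j => buildStack ((pre ++ [row]).map (fun r => r.getD j 0)) 0 []) := by
          apply List.ext_getElem
          · simp; omega
          · intro j h1 h2
            have hjw : j < w := by simpa using h2
            have hj2 : j < row.length := lt_of_lt_of_le hjw hrow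
            simp only [List.getElem_map, List.getElem_zipWith, List.getElem_range]
            show (bStep pre.length row[j] (buildStack (pre.map (fun r => r.getD j 0)) 0 [])).2 = _
            unfold bStep
            simp only
            rw [List.map_append, List.map_cons, List.map_nil, buildStack_snoc,
              List.getD_eq_getElem _ _ hj2]
            simp
        rw [hst]
        have := ih (pre ++ [row]) (fun r hr => hlen r (by simp [hr]))
        simpa using this

theorem range_map_nilstack (w : Nat) :
    (List.range w).map (fun _ : Nat => ([] : List (Int × Nat))) = List.replicate w [] := by
  apply List.ext_getElem <;> simp

-- ===== VERDICT (by name: the statement is the Claim_ definition above) =====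
theorem calc_dist_from_tops_spec : Claim_equal_calc_dist_from_tops := by
  intro grid _ hpre
  unfold Spec_calc_dist_from_tops calc_dist_from_tops calc_dist_from_tops_alt
  have hA := aGo_eq_sGo grid (grid.headD []).length grid [] rfl hpre.2
  have hB := bGo_eq_sGo (grid.headD []).length grid []
    (fun r hr => hpre.2 r hr)
  simp only [List.length_nil, List.map_nil, buildStack, range_map_nilstack] at hA hB
  rw [hA, ← hB]
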